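-- pv_equiv track=rewrite | github.com/Sadegh-Moayedizadeh/coding-exercise | leetcode/python/hard/n_queens.py | _create_solution_board
-- ===== SOURCE A (Python) =====
-- from typing import List, Set, Tuple
--
-- def _create_solution_board(
--     n: int, result_indices: List[Tuple[int, int]]
-- ) -> List[List[str]]:
--     result = []
--     for row in range(n):
--         new_row = []
--         for col in range(n):
--             if (row, col) in result_indices:
--                 new_row.append('Q')
--             else:
--                 new_row.append('.')
--         result.append(new_row)
--     return map(lambda li: ''.join(li), result)
-- ===== SOURCE B (Python) =====
-- from typing import List, Tuple
--
-- def _create_solution_board(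
--     n: int, result_indices: List[Tuple[int, int]]
-- ) -> List[List[str]]:
--     # Build an all-dots board, then place a 'Q' for each listed queen that
--     # actually lies on the board (positions off the board have no cell).
--     board = [['.'] * n for _ in range(n)]
--     for r, c in result_indices:
--         if 0 <= r < n and 0 <= c < n:
--             board[r][c] = 'Q'
--     return map(''.join, board)
-- ===== Notes on version B (the rewrite author's own statement) =====
-- stated objective: faster
-- what changed: Instead of testing every cell for membership in the queen list (n^2 scans of the list), B builds an all-dots board once and does a single pass over the queen list, writing 'Q' directly at each on-board position.
import Mathlib
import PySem

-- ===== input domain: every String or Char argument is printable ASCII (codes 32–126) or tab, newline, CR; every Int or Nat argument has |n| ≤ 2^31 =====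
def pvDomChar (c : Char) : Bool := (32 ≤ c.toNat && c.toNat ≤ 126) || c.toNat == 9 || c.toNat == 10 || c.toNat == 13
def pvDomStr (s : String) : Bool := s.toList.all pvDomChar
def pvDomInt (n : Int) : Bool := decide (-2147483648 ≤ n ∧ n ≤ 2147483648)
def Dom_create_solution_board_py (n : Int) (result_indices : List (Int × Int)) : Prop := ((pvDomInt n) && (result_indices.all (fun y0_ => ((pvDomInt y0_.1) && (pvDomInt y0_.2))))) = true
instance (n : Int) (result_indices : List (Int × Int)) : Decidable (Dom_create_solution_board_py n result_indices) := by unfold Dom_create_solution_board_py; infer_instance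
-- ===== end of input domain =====

-- B replaces A's per-cell membership scan of the queen list by one pass over the
-- queen list writing into an all-dots board (objective: faster).
-- Both Pythons return a lazy `map` object; the ports model the list of strings it yields.
-- Cells are 1-char strings in Python; ported as Char, and ''.join as String.ofList (exact).

-- ===== PORT A =====
def create_solution_board_py (n : Int) (result_indices : List (Int × Int)) : List String :=
  -- result = []; for row in range(n): new_row built cell by cell; result.append(new_row)
  let result : List (List Char) :=
    (PySem.List.pyRange 0 n 1).map (fun row =>
      (PySem.List.pyRange 0 n 1).map (fun col =>
        if (row, col) ∈ result_indices then 'Q' else '.'))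
  result.map (fun li => String.ofList li)

-- ===== PORT B =====
-- loop body of B: if 0 <= r < n and 0 <= c < n: board[r][c] = 'Q'
def pvStep (n : Int) (b : List (List Char)) (rc : Int × Int) : List (List Char) :=
  if 0 ≤ rc.1 ∧ rc.1 < n ∧ 0 ≤ rc.2 ∧ rc.2 < n then
    b.modify rc.1.toNat (fun row => row.set rc.2.toNat 'Q')
  else b

def create_solution_board_py_alt (n : Int) (result_indices : List (Int × Int)) : List String :=
  -- board = [['.'] * n for _ in range(n)]   (['.'] * n with n ≤ 0 is []: replicate n.toNat)
  let board : List (List Char) :=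
    (PySem.List.pyRange 0 n 1).map (fun _ => List.replicate n.toNat '.')
  -- for r, c in result_indices: …
  let board := result_indices.foldl (pvStep n) board
  -- return map(''.join, board)
  board.map (fun li => String.ofList li)

-- ===== PRECONDITION & SPEC =====
def Spec_create_solution_board_py (n : Int) (result_indices : List (Int × Int)) (out : List String) : Prop := out = create_solution_board_py_alt n result_indices
instance (n : Int) (result_indices : List (Int × Int)) (out : List String) : Decidable (Spec_create_solution_board_py n result_indices out) := by unfold Spec_create_solution_board_py; infer_instance

-- ===== CLAIM (what is proved, stated in full; the proofs are below) =====
def Claim_equal_create_solution_board_py : Prop := ∀ (n : Int) (result_indices : List (Int × Int)), Dom_create_solution_board_py n result_indices → Spec_create_solution_board_py n result_indices (create_solution_board_py n result_indices)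

-- ===== LEMMAS AND PROOFS =====

lemma pvStep_length (n : Int) (b : List (List Char)) (rc : Int × Int) :
    (pvStep n b rc).length = b.length := by
  unfold pvStep; split <;> simp

lemma pvStep_rowlen (n : Int) (b : List (List Char)) (rc : Int × Int)
    (h : ∀ (i : Nat) (row : List Char), b[i]? = some row → row.length = n.toNat) :
    ∀ (i : Nat) (row : List Char), (pvStep n b rc)[i]? = some row → row.length = n.toNat := by
  intro i row hrow
  unfold pvStep at hrow
  split at hrow
  · rw [List.getElem?_modify] at hrow
    cases hb : b[i]? with
    | none => rw [hb] at hrow; simp at hrow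
    | some r0 =>
      rw [hb] at hrow
      simp only [Option.map_eq_map, Option.map_some, Option.some.injEq] at hrow
      have hlen := h i r0 hb
      rw [← hrow]
      split
      · simpa using hlen
      · exact hlen
  · exact h i row hrow

-- cell access
def pvCell (b : List (List Char)) (i j : Nat) : Option Char := b[i]?.bind (fun r => r[j]?)

lemma pvStep_cell (n : Int) (b : List (List Char)) (rc : Int × Int) (i j : Nat)
    (hi : (i : Int) < n) (hj : (j : Int) < n)
    (hrow : ∀ (i : Nat) (row : List Char), b[i]? = some row → row.length = n.toNat)
    (hlen : b.length = n.toNat) :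
    pvCell (pvStep n b rc) i j =
      if rc = ((i : Int), (j : Int)) then some 'Q' else pvCell b i j := by
  have hiN : i < n.toNat := by omega
  have hjN : j < n.toNat := by omega
  obtain ⟨r0, hr0⟩ : ∃ r0, b[i]? = some r0 :=
    ⟨_, List.getElem?_eq_getElem (by omega)⟩
  have hr0len : r0.length = n.toNat := hrow i r0 hr0
  unfold pvStep pvCell
  by_cases hg : 0 ≤ rc.1 ∧ rc.1 < n ∧ 0 ≤ rc.2 ∧ rc.2 < n
  · simp only [if_pos hg]
    rw [List.getElem?_modify, hr0]
    by_cases he : rc.1.toNat = i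
    · by_cases hc : rc.2.toNat = j
      · have hrceq : rc = ((i : Int), (j : Int)) :=
          Prod.ext (by omega) (by omega)
        simp [hrceq, hr0len, hjN]
      · have hrcne : rc ≠ ((i : Int), (j : Int)) := by
          intro hcon; apply hc; rw [hcon]; simp
        simp [he, hc, hrcne]
    · have hrcne : rc ≠ ((i : Int), (j : Int)) := by
        intro hcon; apply he; rw [hcon]; simp
      simp [he, hrcne]
  · have hrcne : rc ≠ ((i : Int), (j : Int)) := by
      intro hcon; apply hg; rw [hcon]
      refine ⟨by positivity, hi, by positivity, hj⟩
    simp [hg, hrcne]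

lemma pvFold_length (n : Int) (idx : List (Int × Int)) (b : List (List Char)) :
    (idx.foldl (pvStep n) b).length = b.length := by
  induction idx generalizing b with
  | nil => rfl
  | cons p rest ih => rw [List.foldl_cons, ih, pvStep_length]

lemma pvFold_rowlen (n : Int) (idx : List (Int × Int)) (b : List (List Char))
    (h : ∀ (i : Nat) (row : List Char), b[i]? = some row → row.length = n.toNat) :
    ∀ (i : Nat) (row : List Char), (idx.foldl (pvStep n) b)[i]? = some row → row.length = n.toNat := by
  induction idx generalizing b with
  | nil => exact h
  | cons p rest ih => exact ih _ (pvStep_rowlen n b p h)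

lemma pvFold_cell (n : Int) (idx : List (Int × Int)) (b : List (List Char)) (i j : Nat)
    (hi : (i : Int) < n) (hj : (j : Int) < n)
    (hrow : ∀ (i : Nat) (row : List Char), b[i]? = some row → row.length = n.toNat)
    (hlen : b.length = n.toNat) :
    pvCell (idx.foldl (pvStep n) b) i j =
      if ((i : Int), (j : Int)) ∈ idx then some 'Q' else pvCell b i j := by
  induction idx generalizing b with
  | nil => simp
  | cons p rest ih =>
    rw [List.foldl_cons]
    rw [ih (pvStep n b p) (pvStep_rowlen n b p hrow)
        (by rw [pvStep_length]; exact hlen)]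
    rw [pvStep_cell n b p i j hi hj hrow hlen]
    by_cases hm : ((i : Int), (j : Int)) ∈ rest
    · simp [hm]
    · by_cases hp : p = ((i : Int), (j : Int))
      · simp [hp, hm]
      · have hne : ((i : Int), (j : Int)) ≠ p := fun h => hp h.symm
        simp [hm, hp, hne]

-- the initial board of B and its cells
lemma pvInit_rowlen (n : Int) :
    ∀ (i : Nat) (row : List Char),
      ((PySem.List.pyRange 0 n 1).map (fun _ => List.replicate n.toNat ('.' : Char)))[i]? = some row →
      row.length = n.toNat := by
  intro i row h
  rw [List.getElem?_map] at h
  cases hb : (PySem.List.pyRange 0 n 1)[i]? with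
  | none => simp [hb] at h
  | some x => simp [hb] at h; simp [← h]

lemma pvInit_length (n : Int) :
    ((PySem.List.pyRange 0 n 1).map (fun _ => List.replicate n.toNat ('.' : Char))).length = n.toNat := by
  simp [PySem.List.length_pyRange_one]

lemma pvInit_cell (n : Int) (i j : Nat) (hi : i < n.toNat) (hj : j < n.toNat) :
    pvCell ((PySem.List.pyRange 0 n 1).map (fun _ => List.replicate n.toNat ('.' : Char))) i j
      = some '.' := by
  unfold pvCell
  rw [List.getElem?_map]
  have h1 : (PySem.List.pyRange 0 n 1)[i]? = some ((0 : Int) + i) := by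
    rw [PySem.List.getElem?_pyRange_one]
    simp [hi]
  simp [h1, hj]

-- cells of A's grid
lemma pvA_cell (n : Int) (idx : List (Int × Int)) (i j : Nat)
    (hi : i < n.toNat) (hj : j < n.toNat) :
    pvCell ((PySem.List.pyRange 0 n 1).map (fun row =>
      (PySem.List.pyRange 0 n 1).map (fun col => if (row, col) ∈ idx then 'Q' else '.'))) i j
      = some (if ((i : Int), (j : Int)) ∈ idx then 'Q' else '.') := by
  unfold pvCell
  have h1 : (PySem.List.pyRange 0 n 1)[i]? = some ((0 : Int) + i) := by
    rw [PySem.List.getElem?_pyRange_one]; simp [hi]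
  have h2 : (PySem.List.pyRange 0 n 1)[j]? = some ((0 : Int) + j) := by
    rw [PySem.List.getElem?_pyRange_one]; simp [hj]
  rw [List.getElem?_map]
  simp [h1, List.getElem?_map, h2]

-- the two grids agree
lemma pv_grids_eq (n : Int) (idx : List (Int × Int)) :
    ((PySem.List.pyRange 0 n 1).map (fun row =>
        (PySem.List.pyRange 0 n 1).map (fun col => if (row, col) ∈ idx then 'Q' else '.')))
    = idx.foldl (pvStep n)
        ((PySem.List.pyRange 0 n 1).map (fun _ => List.replicate n.toNat ('.' : Char))) := by
  set gA := (PySem.List.pyRange 0 n 1).map (fun row =>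
        (PySem.List.pyRange 0 n 1).map (fun col => if (row, col) ∈ idx then 'Q' else '.')) with hgA
  set g0 := (PySem.List.pyRange 0 n 1).map (fun _ => List.replicate n.toNat ('.' : Char)) with hg0
  set gB := idx.foldl (pvStep n) g0 with hgB
  have hlenA : gA.length = n.toNat := by simp [hgA, PySem.List.length_pyRange_one]
  have hlenB : gB.length = n.toNat := by
    rw [hgB, pvFold_length]; exact pvInit_length n
  have hrowB := pvFold_rowlen n idx g0 (pvInit_rowlen n)
  apply List.ext_getElem?
  intro i
  by_cases hi : i < n.toNat
  · obtain ⟨rA, hrA⟩ : ∃ r, gA[i]? = some r :=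
      ⟨_, List.getElem?_eq_getElem (by omega)⟩
    obtain ⟨rB, hrB⟩ : ∃ r, gB[i]? = some r :=
      ⟨_, List.getElem?_eq_getElem (by omega)⟩
    rw [hrA, hrB]
    congr 1
    have hAlen : rA.length = n.toNat := by
      rw [hgA, List.getElem?_map] at hrA
      cases hb : (PySem.List.pyRange 0 n 1)[i]? with
      | none => simp [hb] at hrA
      | some x => simp [hb] at hrA; simp [← hrA, PySem.List.length_pyRange_one]
    have hBlen : rB.length = n.toNat := hrowB i rB hrB
    apply List.ext_getElem?
    intro j
    by_cases hj : j < n.toNat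
    · have hiI : (i : Int) < n := by omega
      have hjI : (j : Int) < n := by omega
      have hA := pvA_cell n idx i j hi hj
      have hB := pvFold_cell n idx g0 i j hiI hjI (pvInit_rowlen n) (pvInit_length n)
      rw [pvInit_cell n i j hi hj] at hB
      unfold pvCell at hA hB
      rw [hrA] at hA; rw [hrB] at hB
      simp only [Option.bind_some] at hA hB
      rw [hA, hB]
      split <;> rfl
    · rw [List.getElem?_eq_none (by omega), List.getElem?_eq_none (by omega)]
  · rw [List.getElem?_eq_none (by omega), List.getElem?_eq_none (by omega)]

-- ===== VERDICT (by name: the statement is the Claim_ definition above) =====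
theorem create_solution_board_py_spec : Claim_equal_create_solution_board_py := by
  intro n idx _
  unfold Spec_create_solution_board_py create_solution_board_py create_solution_board_py_alt
  simp only
  rw [pv_grids_eq n idx]
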